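-- pv_equiv track=rewrite | github.com/LukeTheDukeHatter/JSON-Parser | parser_1.py | get_all_markers
-- ===== SOURCE A (Python) =====
-- def get_closer_index(data, start_index, open_type):
--     opposite = {
--         '[': ']',
--         '{': '}',
--         '"': '"'
--     }
--     in_string = False
--     bracket_count = 0
--     for i in range(start_index, len(data)):
--         if data[i] == open_type and not in_string:
--             bracket_count += 1
--         elif data[i] == opposite[open_type] and not in_string:
--             bracket_count -= 1
--         elif data[i] == '"' and data[i-1] != '\\':
--             in_string = not in_string
--
--         if bracket_count == 0:
--             return i
--
-- def get_all_markers(data):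
--     new_markers = "[]{}\",:"
--     in_string = False
--
--     found_markers = []
--     stack = {
--         '{':[],
--         '[':[],
--         '"':[]
--     }
--     marker_pairs = {
--         '{':[],
--         '[':[],
--         '"':[]
--     }
--
--     for i in range(0, len(data)):
--         key = data[i]
--         if key == '"' and data[i-1] != '\\':
--             in_string = not in_string
--
--             found_markers.append((key,i))
--             stack[key].append(i)
--
--         if key in new_markers and not in_string and key != '"':
--
--             found_markers.append((key,i))
--
--             if key in stack.keys():
--                 stack[key].append(i)
--
--     for i in stack['{']: marker_pairs['{'].append((i,get_closer_index(data, i, '{')))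
--     for i in stack['[']: marker_pairs['['].append((i,get_closer_index(data, i, '[')))
--     for i in range(0,len(stack['"']),2): marker_pairs['"'].append((stack['"'][i], stack['"'][i+1]))
--
--     return (found_markers, marker_pairs)
-- ===== SOURCE B (Python) =====
-- def _scan(data):
--     # single pass: the flat list of found markers, in order
--     found = []
--     in_string = False
--     for i in range(len(data)):
--         ch = data[i]
--         if ch == '"' and not (i > 0 and data[i-1] == '\\'):
--             found.append((ch, i))
--             in_string = not in_string
--         elif not in_string and ch in "[]{},:":
--             found.append((ch, i))
--     return found
--
-- def _match(tokens):
--     # stack matching over a token list [(index, is_open), ...]: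
--     # pairs are emitted in open order, closer filled in when popped
--     pairs = []
--     stack = []
--     for idx, is_open in tokens:
--         if is_open:
--             stack.append(len(pairs))
--             pairs.append((idx, None))
--         elif stack:
--             k = stack.pop()
--             pairs[k] = (pairs[k][0], idx)
--     return pairs
--
-- def _two_at_a_time(xs):
--     it = iter(xs)
--     return list(zip(it, it))
--
-- def get_all_markers(data):
--     found = _scan(data)
--
--     def toks(o, c):
--         return [(i, ch == o) for ch, i in found if ch == o or ch == c]
--
--     quotes = [i for ch, i in found if ch == '"']
--     return (found, {
--         '{': _match(toks('{', '}')),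
--         '[': _match(toks('[', ']')),
--         '"': _two_at_a_time(quotes),
--     })
-- ===== Notes on version B (the rewrite author's own statement) =====
-- stated objective: alternative
-- what changed: Replaces A's fused scan with per-open-bracket rescans to the end of the string (get_closer_index, called once per '{' and '[') by three staged passes: one scan producing only the flat found-marker list, then for each bracket type a linear stack-matching pass over the extracted token list that fills each pair's closer in place, and quote pairing by consuming the quote positions two at a time with zip(it, it).
-- intended difference: On strings that begin with '"' and end with '\', A's data[i-1] at i=0 wraps around to the last character, silently treats the opening quote as escaped and drops it from the found markers; B treats a quote at position 0 as unescaped (it has no preceding character), which is the intended escape rule. — e.g. on get_all_markers("\"a\\"): A returns ([], [("{", []), ("[", []), ("\"", [])]), B returns ([("\"", 0)], [("{", []), ("[", []), ("\"", [])])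
import Mathlib
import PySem

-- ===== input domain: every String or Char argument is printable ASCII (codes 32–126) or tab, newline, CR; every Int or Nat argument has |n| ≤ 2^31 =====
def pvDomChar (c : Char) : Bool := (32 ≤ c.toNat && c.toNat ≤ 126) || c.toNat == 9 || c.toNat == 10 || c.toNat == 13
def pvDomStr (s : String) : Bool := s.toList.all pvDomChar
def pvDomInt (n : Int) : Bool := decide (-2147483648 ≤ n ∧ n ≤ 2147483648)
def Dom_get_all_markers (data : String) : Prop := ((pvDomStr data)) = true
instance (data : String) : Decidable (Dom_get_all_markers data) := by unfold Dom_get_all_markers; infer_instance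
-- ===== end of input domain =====

-- B replaces A's fused scan + per-open-bracket rescans by three staged linear passes
-- (scan, per-type stack matching over tokens, two-at-a-time quote pairing);
-- return value only (no mutation in either program). Objective: alternative.

-- Shared by both ports: A's unescaped-quote test, exactly as A writes it.
-- A's test: data[i] == '"' and data[i-1] != '\\'   (at i = 0, data[-1] is the LAST character)
def pvUA (l : List Char) (i : Nat) : Bool :=
  (l.getD i ' ' == '"') && !(PySem.List.pyGet? l ((i : Int) - 1) == some '\\')

-- A's new_markers = "[]{}\",:"
def pvMarkersAll : List Char := ['[', ']', '{', '}', '"', ',', ':']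

-- ===== PORT A =====

-- get_closer_index's scan loop (early return ⇒ recursion over the remaining index list)
def pvGciLoop (l : List Char) (o c : Char) : List Nat → Bool → Int → Option Nat
  | [], _, _ => none
  | i :: rest, inS, cnt =>
    let ch := l.getD i ' '
    if ch = o ∧ inS = false then
      if cnt + 1 = 0 then some i else pvGciLoop l o c rest inS (cnt + 1)
    else if ch = c ∧ inS = false then
      if cnt - 1 = 0 then some i else pvGciLoop l o c rest inS (cnt - 1)
    else if pvUA l i then
      if cnt = 0 then some i else pvGciLoop l o c rest (!inS) cnt
    else
      if cnt = 0 then some i else pvGciLoop l o c rest inS cnt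

-- get_closer_index(data, start, open_type) with c = opposite[open_type]
def pvGci (l : List Char) (start : Nat) (o c : Char) : Option Nat :=
  pvGciLoop l o c (List.range' start (l.length - start)) false 0

-- one iteration of A's main loop; state = (in_string, found, stack['{'], stack['['], stack['"'])
def pvAStep (l : List Char) (st : Bool × List (String × Int) × List Nat × List Nat × List Nat)
    (i : Nat) : Bool × List (String × Int) × List Nat × List Nat × List Nat :=
  match st with
  | (inS, found, sC, sB, sQ) =>
    if pvUA l i then
      (!inS, found ++ [("\"", (i : Int))], sC, sB, sQ ++ [i])
    else if l.getD i ' ' ∈ pvMarkersAll ∧ inS = false ∧ l.getD i ' ' ≠ '"' then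
      if l.getD i ' ' = '{' then
        (inS, found ++ [(String.singleton (l.getD i ' '), (i : Int))], sC ++ [i], sB, sQ)
      else if l.getD i ' ' = '[' then
        (inS, found ++ [(String.singleton (l.getD i ' '), (i : Int))], sC, sB ++ [i], sQ)
      else (inS, found ++ [(String.singleton (l.getD i ' '), (i : Int))], sC, sB, sQ)
    else st

def get_all_markers (data : String) :
    (List (String × Int)) × (List (String × List (Int × Option Int))) :=
  let l := data.toList
  let st := (List.range l.length).foldl (pvAStep l) (false, [], [], [], [])
  let pc := st.2.2.1.foldl
    (fun acc (p : Nat) => acc ++ [((p : Int), (pvGci l p '{' '}').map (fun q => (q : Int)))]) []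
  let pb := st.2.2.2.1.foldl
    (fun acc (p : Nat) => acc ++ [((p : Int), (pvGci l p '[' ']').map (fun q => (q : Int)))]) []
  let sQ := st.2.2.2.2
  -- for i in range(0, len(stack['"']), 2): append((q[i], q[i+1]))  — q[i+1] is none exactly where Python raises IndexError
  let pq := (List.range' 0 ((sQ.length + 1) / 2) 2).foldl
    (fun acc j => acc ++ [(((sQ.getD j 0 : Nat) : Int), (sQ[j+1]?).map (fun (q : Nat) => (q : Int)))]) []
  (st.2.1, [("{", pc), ("[", pb), ("\"", pq)])

-- ===== PORT B =====

-- B's marker string "[]{},:" (no quote)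
def pvBMarkers : List Char := ['[', ']', '{', '}', ',', ':']

-- _scan's loop body; state = (in_string, found) only
def pvScanStep (l : List Char) (st : Bool × List (String × Int)) (i : Nat) :
    Bool × List (String × Int) :=
  let ch := l.getD i ' '
  if (ch == '"') && !(decide (0 < i) && (l.getD (i - 1) ' ' == '\\')) then
    (!st.1, st.2 ++ [("\"", (i : Int))])
  else if st.1 = false ∧ ch ∈ pvBMarkers then
    (st.1, st.2 ++ [(String.singleton ch, (i : Int))])
  else st

def pvScan (l : List Char) : List (String × Int) :=
  ((List.range l.length).foldl (pvScanStep l) (false, [])).2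

-- toks(o, c): [(i, ch == o) for ch, i in found if ch == o or ch == c]
def pvToksOf (found : List (String × Int)) (o c : Char) : List (Int × Bool) :=
  found.filterMap (fun fi =>
    if fi.1 = String.singleton o then some (fi.2, true)
    else if fi.1 = String.singleton c then some (fi.2, false)
    else none)

-- [i for ch, i in found if ch == '"']
def pvQuotesOf (found : List (String × Int)) : List Int :=
  found.filterMap (fun fi => if fi.1 = "\"" then some fi.2 else none)

-- _match's loop body; state = (stack of positions INTO pairs, pairs)
-- (Python-list stack with append/pop at the end is represented head-first: push = cons, pop = head)
def pvMatchStep (st : List Nat × List (Int × Option Int)) (t : Int × Bool) :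
    List Nat × List (Int × Option Int) :=
  match st, t with
  | (stack, pairs), (idx, isOpen) =>
    if isOpen then (pairs.length :: stack, pairs ++ [(idx, none)])
    else
      match stack with
      | [] => ([], pairs)
      | k :: ks => (ks, pairs.set k ((pairs.getD k (default, none)).1, some idx))

def pvMatch (toks : List (Int × Bool)) : List (Int × Option Int) :=
  (toks.foldl pvMatchStep ([], [])).2

-- _two_at_a_time: zip(it, it) consumes two elements per emitted pair — ported as
-- two-at-a-time structural recursion (exact)
def pvPairTwo : List Int → List (Int × Option Int)
  | a :: b :: r => (a, some b) :: pvPairTwo r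
  | _ => []

def get_all_markers_alt (data : String) :
    (List (String × Int)) × (List (String × List (Int × Option Int))) :=
  let found := pvScan data.toList
  let quotes := pvQuotesOf found
  (found,
   [("{", pvMatch (pvToksOf found '{' '}')),
    ("[", pvMatch (pvToksOf found '[' ']')),
    ("\"", pvPairTwo quotes)])

-- ===== PRECONDITION & SPEC =====

-- Pre_ excludes exactly the inputs where A raises IndexError: an odd number of
-- unescaped quotes makes A's pairing loop read stack['"'][i+1] past the end.
def Pre_get_all_markers (data : String) : Prop :=
  (List.range data.toList.length).countP (fun i => pvUA data.toList i) % 2 = 0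
instance (data : String) : Decidable (Pre_get_all_markers data) := by
  unfold Pre_get_all_markers; infer_instance

def pvWitness_get_all_markers : String := "{\"a\": [1]}"

-- On strings that start with '"' and end with '\', A's data[i-1] at i=0 wraps around to the
-- LAST character and silently treats the opening quote as escaped, dropping it from the found
-- markers; B treats a quote at position 0 as unescaped (it has no preceding character), which
-- is the intended escape rule.
def D_get_all_markers (data : String) : Prop :=
  data.toList ≠ [] ∧ data.toList.headD ' ' = '"' ∧ data.toList.getLast? = some '\\'
instance (data : String) : Decidable (D_get_all_markers data) := by
  unfold D_get_all_markers; infer_instance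

def Spec_get_all_markers (data : String)
    (out : (List (String × Int)) × (List (String × List (Int × Option Int)))) : Prop :=
  ¬ D_get_all_markers data → out = get_all_markers_alt data
instance (data : String) (out : (List (String × Int)) × (List (String × List (Int × Option Int)))) :
    Decidable (Spec_get_all_markers data out) := by unfold Spec_get_all_markers; infer_instance

def pvDiffWitness_get_all_markers : String := "\"a\\"

def pvDiffWitnessOut_get_all_markers :
    ((List (String × Int)) × (List (String × List (Int × Option Int)))) ×
    ((List (String × Int)) × (List (String × List (Int × Option Int)))) :=
  (([], [("{", []), ("[", []), ("\"", [])]),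
   ([("\"", 0)], [("{", []), ("[", []), ("\"", [])]))

-- ===== CLAIM =====

def Claim_unchanged_get_all_markers : Prop := ∀ (data : String), Dom_get_all_markers data →
  Pre_get_all_markers data → Spec_get_all_markers data (get_all_markers data)

def Claim_changed_get_all_markers : Prop :=
  Dom_get_all_markers (pvDiffWitness_get_all_markers) ∧
  Pre_get_all_markers (pvDiffWitness_get_all_markers) ∧
  D_get_all_markers (pvDiffWitness_get_all_markers) ∧
  get_all_markers (pvDiffWitness_get_all_markers) = pvDiffWitnessOut_get_all_markers.1 ∧
  get_all_markers_alt (pvDiffWitness_get_all_markers) = pvDiffWitnessOut_get_all_markers.2 ∧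
  pvDiffWitnessOut_get_all_markers.1 ≠ pvDiffWitnessOut_get_all_markers.2

def Claim_exact_get_all_markers : Prop := ∀ (data : String), Dom_get_all_markers data →
  Pre_get_all_markers data → D_get_all_markers data →
  get_all_markers data ≠ get_all_markers_alt data

-- ===== LEMMAS AND PROOFS =====

-- B's unescaped-quote test (as pvScanStep writes it inline): ch == '"' and not (i > 0 and data[i-1] == '\\')
-- B's test: ch == '"' and not (i > 0 and data[i-1] == '\\')
def pvUB (l : List Char) (i : Nat) : Bool :=
  (l.getD i ' ' == '"') && !(decide (0 < i) && (l.getD (i - 1) ' ' == '\\'))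

-- proof-only spec functions, parameterized by the unescaped-quote test u

def pvEndS (u : Nat → Bool) : Bool → List Nat → Bool
  | inS, [] => inS
  | inS, i :: r => pvEndS u (if u i then !inS else inS) r

def pvFoundSpec (l : List Char) (u : Nat → Bool) : Bool → List Nat → List (String × Int)
  | _, [] => []
  | inS, i :: r =>
    if u i then ("\"", (i : Int)) :: pvFoundSpec l u (!inS) r
    else if l.getD i ' ' ∈ pvMarkersAll ∧ inS = false ∧ l.getD i ' ' ≠ '"' then
      (String.singleton (l.getD i ' '), (i : Int)) :: pvFoundSpec l u inS r
    else pvFoundSpec l u inS r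

def pvQSpec (u : Nat → Bool) : Bool → List Nat → List Nat
  | _, [] => []
  | inS, i :: r => if u i then i :: pvQSpec u (!inS) r else pvQSpec u inS r

def pvToks (l : List Char) (u : Nat → Bool) (o c : Char) : Bool → List Nat → List (Nat × Bool)
  | _, [] => []
  | inS, i :: r =>
    if u i then pvToks l u o c (!inS) r
    else if l.getD i ' ' = o ∧ inS = false then (i, true) :: pvToks l u o c inS r
    else if l.getD i ' ' = c ∧ inS = false then (i, false) :: pvToks l u o c inS r
    else pvToks l u o c inS r

def pvOpensOf (ts : List (Nat × Bool)) : List Nat :=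
  ts.filterMap (fun t => if t.2 then some t.1 else none)

def pvFindClose {α : Type} : List (α × Bool) → Nat → Option α
  | [], _ => none
  | (_, true) :: r, d => pvFindClose r (d + 1)
  | (q, false) :: r, d => if d = 1 then some q else pvFindClose r (d - 1)

def pvSpecRun {α : Type} : List (α × Bool) → List (α × Option α)
  | [] => []
  | (q, true) :: r => (q, pvFindClose r 1) :: pvSpecRun r
  | (_, false) :: r => pvSpecRun r

def pvFill {α : Type} [Inhabited α] (ts : List (α × Bool)) :
    List Nat → Nat → List (α × Option α) → List (α × Option α)
  | [], _, pairs => pairs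
  | k :: ks, d, pairs => pvFill ts ks (d + 1) (pairs.set k ((pairs.getD k (default, none)).1, pvFindClose ts d))

def pvStackEnd {α : Type} : List (α × Bool) → List Nat → Nat → List Nat
  | [], s, _ => s
  | (_, true) :: r, s, len => pvStackEnd r (len :: s) (len + 1)
  | (_, false) :: r, s, len =>
    match s with
    | [] => pvStackEnd r [] len
    | _ :: ks => pvStackEnd r ks len

def pvStackOK {α : Type} [Inhabited α] (s : List Nat) (pairs : List (α × Option α)) : Prop :=
  s.Pairwise (· > ·) ∧ ∀ k ∈ s, k < pairs.length ∧ (pairs.getD k (default, none)).2 = none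

def pvCastTok (t : Nat × Bool) : Int × Bool := ((t.1 : Int), t.2)

def pvCastPairs (ps : List (Nat × Option Nat)) : List (Int × Option Int) :=
  ps.map (fun x => ((x.1 : Int), x.2.map (fun q => (q : Int))))

-- A's step-2 quote-pairing spec (Nat positions, Int/Option output as in both ports)
def pvPairUp : List Nat → List (Int × Option Int)
  | a :: b :: r => ((a : Int), some ((b : Int))) :: pvPairUp r
  | _ => []

theorem pvFill_nil {α : Type} [Inhabited α] : ∀ (s : List Nat) (d : Nat) (pairs : List (α × Option α)),
    (∀ k ∈ s, k < pairs.length ∧ (pairs.getD k (default, none)).2 = none) →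
    pvFill [] s d pairs = pairs := by
  intro s
  induction s with
  | nil => intro d pairs _; rfl
  | cons k ks ih =>
    intro d pairs h
    obtain ⟨hk, hv⟩ := h k (by simp)
    have hset : pairs.set k ((pairs.getD k (default, none)).1, pvFindClose [] d) = pairs := by
      have heta : ((pairs.getD k (default, none)).1, pvFindClose ([] : List (α × Bool)) d) = pairs.getD k (default, none) := by
        have h2 : pvFindClose ([] : List (α × Bool)) d = (pairs.getD k (default, none)).2 := hv.symm
        rw [h2]
      rw [heta, List.getD_eq_getElem pairs _ hk]
      exact List.set_getElem_self ..
    show pvFill [] ks (d+1) _ = pairs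
    rw [hset]
    exact ih (d+1) pairs (fun k' hk' => h k' (by simp [hk']))

theorem pvFill_cons_open {α : Type} [Inhabited α] (q : α) (ts : List (α × Bool)) :
    ∀ (s : List Nat) (d : Nat) (pairs : List (α × Option α)),
    pvFill ((q, true) :: ts) s d pairs = pvFill ts s (d + 1) pairs := by
  intro s
  induction s with
  | nil => intro d pairs; rfl
  | cons k ks ih =>
    intro d pairs
    show pvFill ((q, true) :: ts) ks (d+1) _ = pvFill ts ks (d+1+1) _
    rw [show pvFindClose ((q, true) :: ts) d = pvFindClose ts (d+1) from rfl]
    exact ih (d+1) _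

theorem pvFill_cons_close {α : Type} [Inhabited α] (q : α) (ts : List (α × Bool)) :
    ∀ (s : List Nat) (d : Nat) (pairs : List (α × Option α)), 2 ≤ d →
    pvFill ((q, false) :: ts) s d pairs = pvFill ts s (d - 1) pairs := by
  intro s
  induction s with
  | nil => intro d pairs _; rfl
  | cons k ks ih =>
    intro d pairs hd
    show pvFill ((q, false) :: ts) ks (d+1) _ = pvFill ts ks (d-1+1) _
    rw [show pvFindClose ((q, false) :: ts) d = if d = 1 then some q else pvFindClose ts (d-1) from rfl]
    rw [if_neg (by omega)]
    rw [ih (d+1) _ (by omega), show d + 1 - 1 = d - 1 + 1 by omega]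

theorem pvFill_append {α : Type} [Inhabited α] (ts : List (α × Bool)) :
    ∀ (s : List Nat) (d : Nat) (pairs rest : List (α × Option α)),
    (∀ k ∈ s, k < pairs.length) →
    pvFill ts s d (pairs ++ rest) = pvFill ts s d pairs ++ rest := by
  intro s
  induction s with
  | nil => intro d pairs rest _; rfl
  | cons k ks ih =>
    intro d pairs rest h
    have hk : k < pairs.length := h k (by simp)
    show pvFill ts ks (d+1) _ = pvFill ts ks (d+1) _ ++ rest
    have hg : (pairs ++ rest).getD k (default, none) = pairs.getD k (default, none) := by
      simp [List.getD, List.getElem?_append_left hk]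
    rw [hg, List.set_append_left _ _ hk]
    exact ih (d+1) _ rest (fun k' hk' => by
      rw [List.length_set]; exact h k' (by simp [hk']))

theorem pvStackOK_push {α : Type} [Inhabited α] (stC : List Nat) (pC : List (α × Option α)) (i : α)
    (h : pvStackOK stC pC) : pvStackOK (pC.length :: stC) (pC ++ [(i, none)]) := by
  constructor
  · exact List.pairwise_cons.2 ⟨fun k hk => (h.2 k hk).1, h.1⟩
  · intro k hk
    rcases List.mem_cons.1 hk with hk | hk
    · subst hk
      refine ⟨by simp, ?_⟩
      simp [List.getD]
    · obtain ⟨hlt, hval⟩ := h.2 k hk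
      refine ⟨by simp; omega, ?_⟩
      simpa [List.getD, List.getElem?_append_left hlt] using hval

theorem pvStackOK_pop {α : Type} [Inhabited α] (k : Nat) (ks : List Nat) (pC : List (α × Option α)) (i : α)
    (h : pvStackOK (k :: ks) pC) :
    pvStackOK ks (pC.set k ((pC.getD k (default, none)).1, some i)) := by
  obtain ⟨hpw, hv⟩ := h
  have hgt := (List.pairwise_cons.1 hpw).1
  constructor
  · exact (List.pairwise_cons.1 hpw).2
  · intro k' hk'
    obtain ⟨hlt, hval⟩ := hv k' (by simp [hk'])
    have hne : k ≠ k' := Nat.ne_of_gt (hgt k' hk')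
    refine ⟨by simpa using hlt, ?_⟩
    rw [show (pC.set k ((pC.getD k (default, none)).1, some i)).getD k' (default, none)
        = pC.getD k' (default, none) from by simp [List.getD, List.getElem?_set_ne hne]]
    exact hval

theorem pvFill_push {α : Type} [Inhabited α] (ts : List (α × Bool)) (stC : List Nat)
    (pC : List (α × Option α)) (i : α) (h : ∀ k ∈ stC, k < pC.length) :
    pvFill ts (pC.length :: stC) 1 (pC ++ [(i, none)]) =
      pvFill ((i, true) :: ts) stC 1 pC ++ [(i, pvFindClose ts 1)] := by
  show pvFill ts stC 2 ((pC ++ [(i, none)]).set pC.length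
      (((pC ++ [(i, none)]).getD pC.length (default, none)).1, pvFindClose ts 1)) = _
  have hg : (pC ++ [(i, none)]).getD pC.length (default, none) = (i, none) := by
    simp [List.getD]
  rw [hg]
  show pvFill ts stC 2 ((pC ++ [(i, none)]).set pC.length (i, pvFindClose ts 1)) = _
  have hs : (pC ++ [(i, none)]).set pC.length (i, pvFindClose ts 1) =
      pC ++ [(i, pvFindClose ts 1)] := by simp
  rw [hs, pvFill_append ts stC 2 pC _ h, pvFill_cons_open]

theorem pvFill_pop {α : Type} [Inhabited α] (ts : List (α × Bool)) (k : Nat) (ks : List Nat)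
    (pC : List (α × Option α)) (i : α) :
    pvFill ((i, false) :: ts) (k :: ks) 1 pC =
      pvFill ts ks 1 (pC.set k ((pC.getD k (default, none)).1, some i)) := by
  show pvFill ((i, false) :: ts) ks 2
      (pC.set k ((pC.getD k (default, none)).1, pvFindClose ((i, false) :: ts) 1)) = _
  rw [show pvFindClose ((i, false) :: ts) 1 = some i from by simp [pvFindClose]]
  rw [pvFill_cons_close i ts ks 2 _ (by omega)]

-- A's main loop
theorem pvAFold (l : List Char) : ∀ (js : List Nat) inS found sC sB sQ,
    js.foldl (pvAStep l) (inS, found, sC, sB, sQ) =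
      (pvEndS (pvUA l) inS js,
       found ++ pvFoundSpec l (pvUA l) inS js,
       sC ++ pvOpensOf (pvToks l (pvUA l) '{' '}' inS js),
       sB ++ pvOpensOf (pvToks l (pvUA l) '[' ']' inS js),
       sQ ++ pvQSpec (pvUA l) inS js) := by
  intro js
  induction js with
  | nil =>
    intro inS found sC sB sQ
    simp [pvEndS, pvFoundSpec, pvToks, pvQSpec, pvOpensOf]
  | cons i r ih =>
    intro inS found sC sB sQ
    rw [List.foldl_cons]
    by_cases hu : pvUA l i = true
    · have hstep : pvAStep l (inS, found, sC, sB, sQ) i =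
          (!inS, found ++ [("\"", (i : Int))], sC, sB, sQ ++ [i]) := by
        simp [pvAStep, hu]
      rw [hstep, ih]
      simp [pvEndS, pvFoundSpec, pvToks, pvQSpec, hu]
    · by_cases hm : l.getD i ' ' ∈ pvMarkersAll ∧ inS = false ∧ l.getD i ' ' ≠ '"'
      · obtain ⟨hmem, hb, hqn⟩ := hm
        subst hb
        have hvals : l.getD i ' ' = '[' ∨ l.getD i ' ' = ']' ∨ l.getD i ' ' = '{' ∨
            l.getD i ' ' = '}' ∨ l.getD i ' ' = ',' ∨ l.getD i ' ' = ':' := by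
          simp only [pvMarkersAll, List.mem_cons, List.not_mem_nil, or_false] at hmem
          tauto
        rcases hvals with h|h|h|h|h|h <;>
        · have h' : l[i]?.getD ' ' = l.getD i ' ' := by simp [List.getD]
          rw [h] at h'
          have hstep : pvAStep l (false, found, sC, sB, sQ) i =
              (false, found ++ [(String.singleton (l.getD i ' '), (i : Int))],
               (if l.getD i ' ' = '{' then sC ++ [i] else sC),
               (if l.getD i ' ' = '[' then sB ++ [i] else sB), sQ) := by
            simp only [pvAStep]
            rw [if_neg hu, h]
            simp [pvMarkersAll]
          rw [hstep, ih]
          simp [pvEndS, pvFoundSpec, pvToks, pvQSpec, pvOpensOf, pvMarkersAll, hu, h, h']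
      · have hstep : pvAStep l (inS, found, sC, sB, sQ) i = (inS, found, sC, sB, sQ) := by
          simp only [pvAStep]
          rw [if_neg hu, if_neg hm]
        have t1 : ¬(l.getD i ' ' = '{' ∧ inS = false) := by
          rintro ⟨x, y⟩
          have x' : l[i]?.getD ' ' = '{' := by simpa [List.getD] using x
          exact hm ⟨by simp [pvMarkersAll, List.getD, x'], y, by simp [List.getD, x']⟩
        have t2 : ¬(l.getD i ' ' = '}' ∧ inS = false) := by
          rintro ⟨x, y⟩
          have x' : l[i]?.getD ' ' = '}' := by simpa [List.getD] using x
          exact hm ⟨by simp [pvMarkersAll, List.getD, x'], y, by simp [List.getD, x']⟩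
        have t3 : ¬(l.getD i ' ' = '[' ∧ inS = false) := by
          rintro ⟨x, y⟩
          have x' : l[i]?.getD ' ' = '[' := by simpa [List.getD] using x
          exact hm ⟨by simp [pvMarkersAll, List.getD, x'], y, by simp [List.getD, x']⟩
        have t4 : ¬(l.getD i ' ' = ']' ∧ inS = false) := by
          rintro ⟨x, y⟩
          have x' : l[i]?.getD ' ' = ']' := by simpa [List.getD] using x
          exact hm ⟨by simp [pvMarkersAll, List.getD, x'], y, by simp [List.getD, x']⟩
        rw [hstep, ih]
        simp only [pvEndS, pvFoundSpec, pvToks, pvQSpec, hu, hm, t1, t2, t3, t4,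
          Bool.false_eq_true, if_false, ite_false, if_neg, not_false_iff]

-- B's scan loop: the first branch condition is literally pvUB, the second is
-- membership in "[]{},:" = pvMarkersAll minus '"'
theorem pvBMarkers_iff (ch : Char) : ch ∈ pvBMarkers ↔ (ch ∈ pvMarkersAll ∧ ch ≠ '"') := by
  simp only [pvBMarkers, pvMarkersAll, List.mem_cons, List.not_mem_nil, or_false]
  constructor
  · rintro (rfl|rfl|rfl|rfl|rfl|rfl) <;> simp
  · rintro ⟨(rfl|rfl|rfl|rfl|rfl|rfl|rfl), hne⟩ <;> simp_all

theorem pvScanFold (l : List Char) : ∀ (js : List Nat) inS found,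
    js.foldl (pvScanStep l) (inS, found) =
      (pvEndS (pvUB l) inS js, found ++ pvFoundSpec l (pvUB l) inS js) := by
  intro js
  induction js with
  | nil => intro inS found; simp [pvEndS, pvFoundSpec]
  | cons i r ih =>
    intro inS found
    rw [List.foldl_cons]
    by_cases hu : pvUB l i = true
    · have hstep : pvScanStep l (inS, found) i = (!inS, found ++ [("\"", (i : Int))]) := by
        simp only [pvScanStep]
        rw [if_pos (by simpa [pvUB] using hu)]
      rw [hstep, ih]
      simp [pvEndS, pvFoundSpec, hu]
    · by_cases hm : inS = false ∧ l.getD i ' ' ∈ pvBMarkers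
      · obtain ⟨hb, hmem⟩ := hm
        subst hb
        obtain ⟨hall, hne⟩ := (pvBMarkers_iff _).1 hmem
        have hstep : pvScanStep l (false, found) i =
            (false, found ++ [(String.singleton (l.getD i ' '), (i : Int))]) := by
          simp only [pvScanStep]
          rw [if_neg (by simpa [pvUB] using hu), if_pos ⟨trivial, hmem⟩]
        rw [hstep, ih]
        have hspec : pvFoundSpec l (pvUB l) false (i :: r) =
            (String.singleton (l.getD i ' '), (i : Int)) :: pvFoundSpec l (pvUB l) false r := by
          simp only [pvFoundSpec]
          rw [if_neg hu, if_pos ⟨hall, trivial, hne⟩]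
        rw [hspec]
        simp [pvEndS, hu]
      · have hstep : pvScanStep l (inS, found) i = (inS, found) := by
          simp only [pvScanStep]
          rw [if_neg (by simpa [pvUB] using hu), if_neg hm]
        have hspec : pvFoundSpec l (pvUB l) inS (i :: r) = pvFoundSpec l (pvUB l) inS r := by
          simp only [pvFoundSpec]
          rw [if_neg hu, if_neg (by rintro ⟨x, y, z⟩; exact hm ⟨y, (pvBMarkers_iff _).2 ⟨x, z⟩⟩)]
        rw [hstep, ih, hspec]
        simp [pvEndS, hu]

-- B's matching fold = fill-in-place ++ forward matches (same invariant as Python's stack)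
theorem pvMatchFold : ∀ (ts : List (Int × Bool)) (stack : List Nat) (pairs : List (Int × Option Int)),
    pvStackOK stack pairs →
    ts.foldl pvMatchStep (stack, pairs) =
      (pvStackEnd ts stack pairs.length, pvFill ts stack 1 pairs ++ pvSpecRun ts) := by
  intro ts
  induction ts with
  | nil =>
    intro stack pairs h
    simp [pvStackEnd, pvSpecRun, pvFill_nil _ _ _ h.2]
  | cons t r ih =>
    intro stack pairs h
    obtain ⟨idx, isOpen⟩ := t
    rw [List.foldl_cons]
    cases isOpen with
    | true =>
      have hstep : pvMatchStep (stack, pairs) (idx, true) =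
          (pairs.length :: stack, pairs ++ [(idx, none)]) := rfl
      rw [hstep, ih _ _ (pvStackOK_push _ _ _ h)]
      rw [pvFill_push _ _ _ _ (fun k hk => (h.2 k hk).1)]
      simp [pvStackEnd, pvSpecRun, List.append_assoc]
    | false =>
      cases stack with
      | nil =>
        have hstep : pvMatchStep ([], pairs) (idx, false) = ([], pairs) := rfl
        rw [hstep, ih _ _ h]
        simp [pvStackEnd, pvSpecRun, pvFill]
      | cons k ks =>
        have hstep : pvMatchStep (k :: ks, pairs) (idx, false) =
            (ks, pairs.set k ((pairs.getD k (default, none)).1, some idx)) := rfl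
        rw [hstep, ih _ _ (pvStackOK_pop _ _ _ _ h)]
        rw [← pvFill_pop]
        simp [pvStackEnd, pvSpecRun]

theorem pvStackOK_nil {α : Type} [Inhabited α] : pvStackOK ([] : List Nat) ([] : List (α × Option α)) :=
  ⟨List.Pairwise.nil, by simp⟩

theorem pvMatch_specRun (ts : List (Int × Bool)) : pvMatch ts = pvSpecRun ts := by
  unfold pvMatch
  rw [pvMatchFold ts [] [] pvStackOK_nil]
  rfl

-- casting Nat-position tokens to Int-position tokens commutes with the matching spec
theorem pvFindClose_map : ∀ (ts : List (Nat × Bool)) (d : Nat),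
    pvFindClose (ts.map pvCastTok) d = (pvFindClose ts d).map (fun (q : Nat) => (q : Int)) := by
  intro ts
  induction ts with
  | nil => intro d; rfl
  | cons t r ih =>
    intro d
    obtain ⟨q, b⟩ := t
    cases b with
    | true => simpa [pvCastTok, pvFindClose] using ih (d + 1)
    | false =>
      by_cases hd : d = 1 <;> simp [pvCastTok, pvFindClose, hd, ih (d - 1)]

theorem pvSpecRun_map : ∀ (ts : List (Nat × Bool)),
    pvSpecRun (ts.map pvCastTok) = pvCastPairs (pvSpecRun ts) := by
  intro ts
  induction ts with
  | nil => rfl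
  | cons t r ih =>
    obtain ⟨q, b⟩ := t
    cases b with
    | true =>
      simp only [List.map_cons, pvCastTok, pvSpecRun, pvCastPairs, pvFindClose_map, ih, List.map_map]
      cases pvFindClose r 1 <;> rfl
    | false => simpa [pvCastTok, pvSpecRun, pvCastPairs] using ih

theorem pvSingleton_eq_iff (a b : Char) : String.singleton a = String.singleton b ↔ a = b := by
  constructor
  · intro h
    have := congrArg String.toList h
    simpa using this
  · rintro rfl; rfl

-- B's token extraction from the found list = the token spec
theorem pvToksOf_spec (l : List Char) (u : Nat → Bool) (o c : Char)
    (ho : o ∈ pvMarkersAll) (hc : c ∈ pvMarkersAll) (hoq : o ≠ '"') (hcq : c ≠ '"')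
    (hoc : o ≠ c) : ∀ (js : List Nat) (inS : Bool),
    pvToksOf (pvFoundSpec l u inS js) o c = (pvToks l u o c inS js).map pvCastTok := by
  intro js
  induction js with
  | nil => intro inS; rfl
  | cons i r ih =>
    intro inS
    by_cases hu : u i = true
    · rw [show pvFoundSpec l u inS (i :: r) = ("\"", (i : Int)) :: pvFoundSpec l u (!inS) r
          from by simp [pvFoundSpec, hu]]
      rw [show pvToks l u o c inS (i :: r) = pvToks l u o c (!inS) r
          from by simp [pvToks, hu]]
      unfold pvToksOf
      rw [List.filterMap_cons]
      have h1 : ("\"" : String) ≠ String.singleton o := by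
        intro h
        exact hoq ((pvSingleton_eq_iff '"' o).1 h).symm
      have h2 : ("\"" : String) ≠ String.singleton c := by
        intro h
        exact hcq ((pvSingleton_eq_iff '"' c).1 h).symm
      rw [if_neg h1, if_neg h2]
      have ih' := ih (!inS)
      unfold pvToksOf at ih'
      exact ih'
    · by_cases hm : l.getD i ' ' ∈ pvMarkersAll ∧ inS = false ∧ l.getD i ' ' ≠ '"'
      · obtain ⟨hmem, hb, hqn⟩ := hm
        subst hb
        rw [show pvFoundSpec l u false (i :: r) =
            (String.singleton (l.getD i ' '), (i : Int)) :: pvFoundSpec l u false r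
            from by simp only [pvFoundSpec]; rw [if_neg hu, if_pos ⟨hmem, trivial, hqn⟩]]
        unfold pvToksOf
        rw [List.filterMap_cons]
        by_cases hco : l.getD i ' ' = o
        · rw [if_pos (by rw [hco]), show pvToks l u o c false (i :: r) =
              (i, true) :: pvToks l u o c false r
              from by simp only [pvToks]; rw [if_neg hu, if_pos ⟨hco, trivial⟩]]
          have ih' := ih false
          unfold pvToksOf at ih'
          rw [ih']
          rfl
        · rw [if_neg (fun h => hco ((pvSingleton_eq_iff _ _).1 h))]
          by_cases hcc : l.getD i ' ' = c
          · rw [if_pos (by rw [hcc]), show pvToks l u o c false (i :: r) =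
                (i, false) :: pvToks l u o c false r
                from by simp only [pvToks]; rw [if_neg hu, if_neg (by rintro ⟨x, _⟩; exact hco x),
                  if_pos ⟨hcc, trivial⟩]]
            have ih' := ih false
            unfold pvToksOf at ih'
            rw [ih']
            rfl
          · rw [if_neg (fun h => hcc ((pvSingleton_eq_iff _ _).1 h))]
            rw [show pvToks l u o c false (i :: r) = pvToks l u o c false r
                from by simp only [pvToks]; rw [if_neg hu, if_neg (by rintro ⟨x, _⟩; exact hco x),
                  if_neg (by rintro ⟨x, _⟩; exact hcc x)]]
            have ih' := ih false
            unfold pvToksOf at ih'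
            exact ih'
      · rw [show pvFoundSpec l u inS (i :: r) = pvFoundSpec l u inS r
            from by simp only [pvFoundSpec]; rw [if_neg hu, if_neg hm]]
        have hno : ¬(l.getD i ' ' = o ∧ inS = false) := by
          rintro ⟨x, y⟩
          exact hm ⟨x ▸ ho, y, x ▸ hoq⟩
        have hnc : ¬(l.getD i ' ' = c ∧ inS = false) := by
          rintro ⟨x, y⟩
          exact hm ⟨x ▸ hc, y, x ▸ hcq⟩
        rw [show pvToks l u o c inS (i :: r) = pvToks l u o c inS r
            from by simp only [pvToks]; rw [if_neg hu, if_neg hno, if_neg hnc]]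
        exact ih inS

-- B's quote extraction from the found list = the quote spec
theorem pvQuotesOf_spec (l : List Char) (u : Nat → Bool) : ∀ (js : List Nat) (inS : Bool),
    pvQuotesOf (pvFoundSpec l u inS js) = (pvQSpec u inS js).map (fun (n : Nat) => (n : Int)) := by
  intro js
  induction js with
  | nil => intro inS; rfl
  | cons i r ih =>
    intro inS
    by_cases hu : u i = true
    · rw [show pvFoundSpec l u inS (i :: r) = ("\"", (i : Int)) :: pvFoundSpec l u (!inS) r
          from by simp [pvFoundSpec, hu]]
      unfold pvQuotesOf
      rw [List.filterMap_cons, if_pos rfl]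
      rw [show pvQSpec u inS (i :: r) = i :: pvQSpec u (!inS) r from by simp [pvQSpec, hu]]
      have ih' := ih (!inS)
      unfold pvQuotesOf at ih'
      rw [ih']
      rfl
    · have hq : pvQSpec u inS (i :: r) = pvQSpec u inS r := by simp [pvQSpec, hu]
      by_cases hm : l.getD i ' ' ∈ pvMarkersAll ∧ inS = false ∧ l.getD i ' ' ≠ '"'
      · rw [show pvFoundSpec l u inS (i :: r) =
            (String.singleton (l.getD i ' '), (i : Int)) :: pvFoundSpec l u inS r
            from by simp only [pvFoundSpec]; rw [if_neg hu, if_pos hm]]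
        unfold pvQuotesOf
        rw [List.filterMap_cons,
          if_neg (fun h => hm.2.2 ((pvSingleton_eq_iff _ _).1
            (h.trans (by decide : ("\"" : String) = String.singleton '"'))))]
        rw [hq]
        have ih' := ih inS
        unfold pvQuotesOf at ih'
        exact ih'
      · rw [show pvFoundSpec l u inS (i :: r) = pvFoundSpec l u inS r
            from by simp only [pvFoundSpec]; rw [if_neg hu, if_neg hm], hq]
        exact ih inS

-- B's two-at-a-time pairing of cast quote positions = the pairing spec
theorem pvPairTwo_spec : ∀ (qs : List Nat),
    pvPairTwo (qs.map (fun (n : Nat) => (n : Int))) = pvPairUp qs := by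
  intro qs
  induction qs using pvPairUp.induct with
  | case1 a b r ih => simp [pvPairTwo, pvPairUp, ih]
  | case2 q hq =>
    cases q with
    | nil => rfl
    | cons a t =>
      cases t with
      | nil => rfl
      | cons b r => exact ((hq a b r rfl).elim)

theorem pvGciLoop_eq (l : List Char) (o c : Char) (ho : o ≠ '"') (hc : c ≠ '"')
    (hoc : o ≠ c) :
    ∀ (js : List Nat) inS (d : Nat), 1 ≤ d →
      pvGciLoop l o c js inS (d : Int) = pvFindClose (pvToks l (pvUA l) o c inS js) d := by
  intro js
  induction js with
  | nil => intro inS d hd; rfl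
  | cons i r ih =>
    intro inS d hd
    by_cases hu : pvUA l i = true
    · have hch : l.getD i ' ' = '"' := by
        have := hu
        unfold pvUA at this
        simp only [Bool.and_eq_true, beq_iff_eq] at this
        exact this.1
      have hdz : ¬((d : Int) = 0) := by omega
      simp only [pvGciLoop, pvToks, hch, Ne.symm ho, Ne.symm hc, hu, hdz, if_true, if_false,
        false_and, if_neg, ite_false, ite_true, not_false_iff]
      try simp [Ne.symm ho, Ne.symm hc, hdz]
      exact ih (!inS) d hd
    · by_cases h1 : l.getD i ' ' = o ∧ inS = false
      · obtain ⟨ha, hb⟩ := h1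
        have hdz : ¬((d : Int) + 1 = 0) := by omega
        have hcast : (d : Int) + 1 = ((d + 1 : Nat) : Int) := by push_cast; ring
        simp only [pvGciLoop, pvToks, hu, ha, hb, hoc, hdz]
        try simp [hoc, hdz, pvFindClose]
        rw [hcast]
        exact ih false (d + 1) (by omega)
      · by_cases h2 : l.getD i ' ' = c ∧ inS = false
        · obtain ⟨ha, hb⟩ := h2
          have hco : c ≠ o := Ne.symm hoc
          by_cases hd1 : d = 1
          · subst hd1
            simp only [pvGciLoop, pvToks, hu, ha, hb, hco]
            simp [hco, pvFindClose]
          · have hdz : ¬((d : Int) - 1 = 0) := by omega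
            have hcast : (d : Int) - 1 = ((d - 1 : Nat) : Int) := by omega
            simp only [pvGciLoop, pvToks, hu, ha, hb, hco]
            try simp [hco, hdz, hd1, pvFindClose]
            rw [hcast]
            exact ih false (d - 1) (by omega)
        · have hdz : ¬((d : Int) = 0) := by omega
          simp only [pvGciLoop, pvToks, hu, h1, h2, hdz, if_false, if_neg]
          exact ih inS d hd

-- on a suffix of the full index range, pvSpecRun pairs each open with A's get_closer_index
theorem pvSpecRun_toks (l : List Char) (o c : Char) (ho : o ≠ '"') (hc : c ≠ '"')
    (hoc : o ≠ c) :
    ∀ (m j : Nat) (inS : Bool), j + m = l.length →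
      pvSpecRun (pvToks l (pvUA l) o c inS (List.range' j m)) =
        (pvOpensOf (pvToks l (pvUA l) o c inS (List.range' j m))).map
          (fun p => (p, pvGci l p o c)) := by
  intro m
  induction m with
  | zero => intro j inS _; rfl
  | succ m ih =>
    intro j inS hj
    rw [List.range'_succ]
    by_cases hu : pvUA l j = true
    · have htk : pvToks l (pvUA l) o c inS (j :: List.range' (j+1) m) =
          pvToks l (pvUA l) o c (!inS) (List.range' (j+1) m) := by
        simp only [pvToks]
        rw [if_pos hu]
      rw [htk]
      exact ih (j+1) (!inS) (by omega)
    · by_cases h1 : l.getD j ' ' = o ∧ inS = false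
      · obtain ⟨ha, hb⟩ := h1
        subst hb
        have htk : pvToks l (pvUA l) o c false (j :: List.range' (j+1) m) =
            (j, true) :: pvToks l (pvUA l) o c false (List.range' (j+1) m) := by
          simp only [pvToks]
          rw [if_neg hu, if_pos ⟨ha, trivial⟩]
        have hts : pvGci l j o c =
            pvFindClose (pvToks l (pvUA l) o c false (List.range' (j+1) m)) 1 := by
          unfold pvGci
          have hlen : l.length - j = m + 1 := by omega
          rw [hlen, List.range'_succ]
          have hstep : pvGciLoop l o c (j :: List.range' (j+1) m) false 0 =
              pvGciLoop l o c (List.range' (j+1) m) false ((1 : Nat) : Int) := by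
            simp only [pvGciLoop]
            rw [ha, if_pos ⟨rfl, trivial⟩, if_neg (by norm_num)]
            norm_num
          rw [hstep, pvGciLoop_eq l o c ho hc hoc _ false 1 (by omega)]
        rw [htk]
        simp only [pvSpecRun, pvOpensOf, List.filterMap_cons, List.map_cons]
        rw [← hts]
        have htail := ih (j+1) false (by omega)
        simp only [pvOpensOf] at htail
        simp [htail]
      · by_cases h2 : l.getD j ' ' = c ∧ inS = false
        · obtain ⟨ha, hb⟩ := h2
          subst hb
          have htk : pvToks l (pvUA l) o c false (j :: List.range' (j+1) m) =
              (j, false) :: pvToks l (pvUA l) o c false (List.range' (j+1) m) := by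
            simp only [pvToks]
            rw [if_neg hu, if_neg (by simpa using h1), if_pos ⟨ha, trivial⟩]
          rw [htk]
          simp only [pvSpecRun, pvOpensOf, List.filterMap_cons]
          have htail := ih (j+1) false (by omega)
          simp only [pvOpensOf] at htail
          simp [htail]
        · have htk : pvToks l (pvUA l) o c inS (j :: List.range' (j+1) m) =
              pvToks l (pvUA l) o c inS (List.range' (j+1) m) := by
            simp only [pvToks]
            rw [if_neg hu, if_neg (by simpa using h1), if_neg (by simpa using h2)]
          rw [htk]
          exact ih (j+1) inS (by omega)

-- A's step-2 pairing loop = the pairing spec, given an even count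
theorem pvPairing_map : ∀ (q : List Nat), q.length % 2 = 0 →
    (List.range' 0 ((q.length + 1) / 2) 2).map
      (fun j => (((q.getD j 0 : Nat) : Int), (q[j+1]?).map (fun (x : Nat) => (x : Int)))) =
      pvPairUp q := by
  intro q
  induction q using pvPairUp.induct with
  | case1 a b r ih =>
    intro hev
    have hlen : (a :: b :: r).length = r.length + 2 := by simp
    have hdiv : (r.length + 2 + 1) / 2 = (r.length + 1) / 2 + 1 := by omega
    rw [hlen, hdiv, List.range'_succ]
    rw [List.map_cons]
    have hhead : (((((a :: b :: r).getD 0 0 : Nat)) : Int),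
        ((a :: b :: r)[0+1]?).map (fun (x : Nat) => (x : Int))) = ((a : Int), some ((b : Int))) := by
      simp [List.getD]
    rw [hhead]
    have hsh : List.range' (0 + 2) ((r.length + 1) / 2) 2 =
        (List.range' 0 ((r.length + 1) / 2) 2).map (2 + ·) := by
      rw [List.map_add_range']
    rw [hsh, List.map_map]
    have hfun : ((fun j => ((((a :: b :: r).getD j 0 : Nat) : Int),
          ((a :: b :: r)[j+1]?).map (fun (x : Nat) => (x : Int)))) ∘ (2 + ·)) =
        (fun j => ((((r.getD j 0 : Nat)) : Int), (r[j+1]?).map (fun (x : Nat) => (x : Int)))) := by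
      funext j
      simp only [Function.comp]
      have h2j : 2 + j = j + 2 := by omega
      rw [h2j]
      simp [List.getD]
    rw [hfun, ih (by omega)]
    rfl
  | case2 q hq =>
    intro hev
    cases q with
    | nil => rfl
    | cons a t =>
      cases t with
      | nil => simp at hev
      | cons b r => exact ((hq a b r rfl).elim)

theorem pvPairing_eq : ∀ (q : List Nat), q.length % 2 = 0 →
    (List.range' 0 ((q.length + 1) / 2) 2).foldl
      (fun acc j => acc ++ [(((q.getD j 0 : Nat) : Int), (q[j+1]?).map (fun (x : Nat) => (x : Int)))]) [] =
      pvPairUp q := by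
  intro q hev
  rw [PySem.List.foldl_append_singleton_eq_map, List.nil_append]
  exact pvPairing_map q hev

theorem pvQSpec_length (u : Nat → Bool) : ∀ (js : List Nat) inS,
    (pvQSpec u inS js).length = js.countP u := by
  intro js
  induction js with
  | nil => intro inS; rfl
  | cons i r ih =>
    intro inS
    by_cases h : u i <;> simp [pvQSpec, h, ih, List.countP_cons]

-- outside D_, the two escape tests agree everywhere
theorem pvU_eq (l : List Char)
    (hD : ¬ (l ≠ [] ∧ l.headD ' ' = '"' ∧ l.getLast? = some '\\')) :
    pvUA l = pvUB l := by
  funext i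
  unfold pvUA pvUB
  by_cases hq : l.getD i ' ' = '"'
  · cases i with
    | zero =>
      have hne : l ≠ [] := by
        intro h; subst h; simp [List.getD] at hq
      have hhead : l.headD ' ' = '"' := by
        cases l with
        | nil => exact absurd rfl hne
        | cons a t => simpa [List.getD] using hq
      have hlast : l.getLast? ≠ some '\\' := fun h => hD ⟨hne, hhead, h⟩
      rw [show ((0 : Nat) : Int) - 1 = -1 by norm_num, PySem.List.pyGet?_neg_one]
      simp [hq, hlast]
    | succ m =>
      rw [show ((m + 1 : Nat) : Int) - 1 = ((m : Nat) : Int) by (push_cast; ring),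
        PySem.List.pyGet?_natCast]
      simp only [Nat.add_sub_cancel, hq]
      cases hm : l[m]? with
      | none =>
        have hg : l.getD m ' ' = ' ' := by simp [List.getD, hm]
        simp [hg, hm]
      | some ch =>
        have hg : l.getD m ' ' = ch := by simp [List.getD, hm]
        simp [hg, hm]
  · have hfalse : (l[i]?.getD ' ' == '"') = false := by
      simpa [List.getD] using hq
    simp [hfalse]

-- entries of pvFoundSpec carry positions from the scanned index list (used for Claim_exact)
theorem pvFoundSpec_mem (l : List Char) (u : Nat → Bool) : ∀ (js : List Nat) inS x,
    x ∈ pvFoundSpec l u inS js → ∃ i ∈ js, x.2 = (i : Int) := by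
  intro js
  induction js with
  | nil => intro inS x hx; simp [pvFoundSpec] at hx
  | cons i r ih =>
    intro inS x hx
    by_cases hu : u i = true
    · rw [show pvFoundSpec l u inS (i :: r) = ("\"", (i : Int)) :: pvFoundSpec l u (!inS) r
          from by simp [pvFoundSpec, hu]] at hx
      rcases List.mem_cons.1 hx with hx | hx
      · exact ⟨i, by simp, by simp [hx]⟩
      · obtain ⟨j, hj, hxj⟩ := ih (!inS) x hx
        exact ⟨j, by simp [hj], hxj⟩
    · by_cases hm : l.getD i ' ' ∈ pvMarkersAll ∧ inS = false ∧ l.getD i ' ' ≠ '"'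
      · rw [show pvFoundSpec l u inS (i :: r) =
            (String.singleton (l.getD i ' '), (i : Int)) :: pvFoundSpec l u inS r
            from by simp only [pvFoundSpec]; rw [if_neg hu, if_pos hm]] at hx
        rcases List.mem_cons.1 hx with hx | hx
        · exact ⟨i, by simp, by simp [hx]⟩
        · obtain ⟨j, hj, hxj⟩ := ih inS x hx
          exact ⟨j, by simp [hj], hxj⟩
      · rw [show pvFoundSpec l u inS (i :: r) = pvFoundSpec l u inS r
            from by simp only [pvFoundSpec]; rw [if_neg hu, if_neg hm]] at hx
        obtain ⟨j, hj, hxj⟩ := ih inS x hx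
        exact ⟨j, by simp [hj], hxj⟩

-- the two ports, written through the fold lemmas (shared final shape)
theorem pvA_closed (data : String) (hpre : Pre_get_all_markers data) :
    get_all_markers data =
      (pvFoundSpec data.toList (pvUA data.toList) false (List.range' 0 data.toList.length),
       [("{", (pvOpensOf (pvToks data.toList (pvUA data.toList) '{' '}' false
            (List.range' 0 data.toList.length))).map
          (fun (p : Nat) => ((p : Int), (pvGci data.toList p '{' '}').map (fun (q : Nat) => (q : Int))))),
        ("[", (pvOpensOf (pvToks data.toList (pvUA data.toList) '[' ']' false
            (List.range' 0 data.toList.length))).map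
          (fun (p : Nat) => ((p : Int), (pvGci data.toList p '[' ']').map (fun (q : Nat) => (q : Int))))),
        ("\"", pvPairUp (pvQSpec (pvUA data.toList) false (List.range' 0 data.toList.length)))]) := by
  unfold Pre_get_all_markers at hpre
  rw [List.range_eq_range'] at hpre
  have hev : (pvQSpec (pvUA data.toList) false (List.range' 0 data.toList.length)).length % 2 = 0 := by
    rw [pvQSpec_length]
    exact hpre
  simp only [get_all_markers]
  rw [List.range_eq_range', pvAFold]
  simp only [List.nil_append]
  rw [PySem.List.foldl_append_singleton_eq_map, PySem.List.foldl_append_singleton_eq_map,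
    pvPairing_eq _ hev]
  simp
  exact ⟨fun a _ => by cases pvGci data.toList a '{' '}' <;> rfl,
    fun a _ => by cases pvGci data.toList a '[' ']' <;> rfl⟩

theorem pvB_closed (data : String) :
    get_all_markers_alt data =
      (pvFoundSpec data.toList (pvUB data.toList) false (List.range' 0 data.toList.length),
       [("{", pvCastPairs (pvSpecRun (pvToks data.toList (pvUB data.toList) '{' '}' false
            (List.range' 0 data.toList.length)))),
        ("[", pvCastPairs (pvSpecRun (pvToks data.toList (pvUB data.toList) '[' ']' false
            (List.range' 0 data.toList.length)))),
        ("\"", pvPairUp (pvQSpec (pvUB data.toList) false (List.range' 0 data.toList.length)))]) := by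
  have hscan : pvScan data.toList =
      pvFoundSpec data.toList (pvUB data.toList) false (List.range' 0 data.toList.length) := by
    unfold pvScan
    rw [List.range_eq_range', pvScanFold]
    rfl
  simp only [get_all_markers_alt, hscan]
  rw [pvToksOf_spec _ _ _ _ (by decide) (by decide) (by decide) (by decide) (by decide),
    pvToksOf_spec _ _ _ _ (by decide) (by decide) (by decide) (by decide) (by decide),
    pvMatch_specRun, pvMatch_specRun, pvSpecRun_map, pvSpecRun_map,
    pvQuotesOf_spec, pvPairTwo_spec]

-- ===== VERDICT =====
theorem get_all_markers_spec : Claim_unchanged_get_all_markers := by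
  intro data _ hpre hD
  show get_all_markers data = get_all_markers_alt data
  have hU : pvUA data.toList = pvUB data.toList := by
    apply pvU_eq
    intro hcon
    exact hD hcon
  rw [pvA_closed data hpre, pvB_closed, ← hU]
  have hcast : ∀ (o c : Char), o ≠ '"' → c ≠ '"' → o ≠ c →
      pvCastPairs (pvSpecRun (pvToks data.toList (pvUA data.toList) o c false
          (List.range' 0 data.toList.length))) =
        (pvOpensOf (pvToks data.toList (pvUA data.toList) o c false
            (List.range' 0 data.toList.length))).map
          (fun (p : Nat) => ((p : Int), (pvGci data.toList p o c).map (fun (q : Nat) => (q : Int)))) := by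
    intro o c ho hc hoc
    rw [pvSpecRun_toks data.toList o c ho hc hoc data.toList.length 0 false (by omega)]
    simp [pvCastPairs, List.map_map, Function.comp]
    intro a _
    cases pvGci data.toList a o c <;> rfl
  rw [hcast '{' '}' (by decide) (by decide) (by decide),
    hcast '[' ']' (by decide) (by decide) (by decide)]

theorem get_all_markers_changed : Claim_changed_get_all_markers := by
  unfold Claim_changed_get_all_markers
  refine ⟨by decide, by decide, by decide, by decide, by decide, by decide⟩

theorem get_all_markers_tight : Claim_exact_get_all_markers := by
  intro data _ hpre hD hcon
  obtain ⟨hne, hhead, hlast⟩ := hD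
  have hfound : (get_all_markers data).1 = (get_all_markers_alt data).1 := by
    rw [hcon]
  rw [pvA_closed data hpre, pvB_closed] at hfound
  dsimp only at hfound
  have hn : 1 ≤ data.toList.length := by
    cases hl : data.toList with
    | nil => exact absurd hl hne
    | cons a t => simp
  have hrange : List.range' 0 data.toList.length =
      0 :: List.range' 1 (data.toList.length - 1) := by
    rw [show data.toList.length = (data.toList.length - 1) + 1 by omega, List.range'_succ]
    simp
  have hch0 : data.toList.getD 0 ' ' = '"' := by
    cases hl : data.toList with
    | nil => exact absurd hl hne
    | cons a t => rw [hl] at hhead; simpa using hhead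
  have hch0' : data.toList[0]?.getD ' ' = '"' := by simpa [List.getD] using hch0
  have huB0 : pvUB data.toList 0 = true := by
    unfold pvUB
    simp [List.getD, hch0']
  have huA0 : pvUA data.toList 0 = true → False := by
    unfold pvUA
    rw [show ((0 : Nat) : Int) - 1 = -1 by norm_num, PySem.List.pyGet?_neg_one, hlast]
    simp [List.getD, hch0']
  have hBhead : pvFoundSpec data.toList (pvUB data.toList) false
      (List.range' 0 data.toList.length) =
      ("\"", (0 : Int)) :: pvFoundSpec data.toList (pvUB data.toList) true
        (List.range' 1 (data.toList.length - 1)) := by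
    rw [hrange]
    simp [pvFoundSpec, huB0]
  have hAtail : pvFoundSpec data.toList (pvUA data.toList) false
      (List.range' 0 data.toList.length) =
      pvFoundSpec data.toList (pvUA data.toList) false
        (List.range' 1 (data.toList.length - 1)) := by
    rw [hrange]
    simp only [pvFoundSpec]
    rw [if_neg huA0, if_neg (by rintro ⟨_, _, hx⟩; exact hx hch0)]
  rw [hBhead, hAtail] at hfound
  have hmem : ("\"", (0 : Int)) ∈ pvFoundSpec data.toList (pvUA data.toList) false
      (List.range' 1 (data.toList.length - 1)) := by
    rw [hfound]
    simp
  obtain ⟨j, hj, hxj⟩ := pvFoundSpec_mem data.toList (pvUA data.toList) _ _ _ hmem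
  have : 1 ≤ j := (List.mem_range'_1.1 hj).1
  simp only at hxj
  omega
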